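-- pv_equiv track=rewrite | github.com/turishev/py-harp | src/pyharp/scale.py | scale_degree_to_step
-- ===== SOURCE A (Python) =====
-- C_MAJOR_SCALE = [('c', 0), ('d', 2), ('e', 4), ('f', 5), ('g', 7), ('a', 9), ('b', 11)]
--
-- def scale_degree_to_step(interval : int) -> str:
--     '''
--     interval : chromatic interval in the major scale
--     return : str, that represents step number with optional alteration sign # or b
--     '''
--     if interval < 0: return ''
--     octave = interval // 12
--     step_chrom = interval % 12
--     if step_chrom == 0: step = '1'
--     elif step_chrom <= 2: step = '2'
--     elif step_chrom <= 4: step = '3'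
--     elif step_chrom <= 5: step = '4'
--     elif step_chrom <= 7: step = '5'
--     elif step_chrom <= 9: step = '6'
--     elif step_chrom <= 11: step = '7'
--     else: step = ''
--
--     maj_steps = [p[1] for p in C_MAJOR_SCALE]
--     alt = 'b' if not step_chrom in maj_steps else ''
--
--     return step + alt + ('/' + str(octave + 1) if octave > 0 else '')
-- ===== SOURCE B (Python) =====
-- STEP = ['1', '2b', '2', '3b', '3', '4', '5b', '5', '6b', '6', '7b', '7']
--
-- def scale_degree_to_step(interval: int) -> str:
--     if interval < 0:
--         return ''
--     octave = interval // 12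
--     result = STEP[interval % 12]
--     return result + ('/' + str(octave + 1) if octave > 0 else '')
-- ===== Notes on version B (the rewrite author's own statement) =====
-- stated objective: simpler
-- what changed: Replaces the if/elif cascade plus the C_MAJOR_SCALE membership test by a single indexed lookup into a precomputed table of complete step+alteration strings, one per chromatic step of the octave.
import Mathlib
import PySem

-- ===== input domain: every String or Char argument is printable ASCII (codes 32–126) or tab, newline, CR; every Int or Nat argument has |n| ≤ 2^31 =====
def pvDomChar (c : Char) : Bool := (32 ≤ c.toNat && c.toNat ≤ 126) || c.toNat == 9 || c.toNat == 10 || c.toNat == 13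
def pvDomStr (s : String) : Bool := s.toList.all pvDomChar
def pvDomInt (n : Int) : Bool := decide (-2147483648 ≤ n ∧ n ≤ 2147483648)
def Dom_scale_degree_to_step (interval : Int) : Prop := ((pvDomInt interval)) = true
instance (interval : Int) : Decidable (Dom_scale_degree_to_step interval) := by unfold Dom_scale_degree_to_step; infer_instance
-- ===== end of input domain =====

-- B is simpler: the step/alteration if-elif cascade and membership test of A collapse into one lookup in a precomputed table of step+alteration strings.
-- ===== PORT A =====
def C_MAJOR_SCALE : List (String × Int) :=
  [("c", 0), ("d", 2), ("e", 4), ("f", 5), ("g", 7), ("a", 9), ("b", 11)]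

def scale_degree_to_step (interval : Int) : String :=
  if interval < 0 then "" else
  let octave := PySem.Int.floordiv interval 12
  let step_chrom := PySem.Int.mod interval 12
  let step :=
    if step_chrom = 0 then "1"
    else if step_chrom ≤ 2 then "2"
    else if step_chrom ≤ 4 then "3"
    else if step_chrom ≤ 5 then "4"
    else if step_chrom ≤ 7 then "5"
    else if step_chrom ≤ 9 then "6"
    else if step_chrom ≤ 11 then "7"
    else ""
  let maj_steps := C_MAJOR_SCALE.map (fun p => p.2)
  let alt := if ¬ (step_chrom ∈ maj_steps) then "b" else ""
  step ++ alt ++ (if octave > 0 then "/" ++ PySem.Int.toStr (octave + 1) else "")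

-- ===== PORT B =====
def STEP : List String :=
  ["1", "2b", "2", "3b", "3", "4", "5b", "5", "6b", "6", "7b", "7"]

def scale_degree_to_step_alt (interval : Int) : String :=
  if interval < 0 then "" else
  let octave := PySem.Int.floordiv interval 12
  let result := PySem.List.pyGetD STEP (PySem.Int.mod interval 12) ""
  result ++ (if octave > 0 then "/" ++ PySem.Int.toStr (octave + 1) else "")

-- ===== PRECONDITION & SPEC =====
def Spec_scale_degree_to_step (interval : Int) (out : String) : Prop := out = scale_degree_to_step_alt interval
instance (interval : Int) (out : String) : Decidable (Spec_scale_degree_to_step interval out) := by unfold Spec_scale_degree_to_step; infer_instance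

-- ===== CLAIM (what is proved, stated in full; the proofs are below) =====
def Claim_equal_scale_degree_to_step : Prop := ∀ (interval : Int), Dom_scale_degree_to_step interval → Spec_scale_degree_to_step interval (scale_degree_to_step interval)

-- ===== LEMMAS AND PROOFS =====

-- ===== VERDICT (by name: the statement is the Claim_ definition above) =====
theorem scale_degree_to_step_spec : Claim_equal_scale_degree_to_step := by
  intro interval _
  show scale_degree_to_step interval = scale_degree_to_step_alt interval
  unfold scale_degree_to_step scale_degree_to_step_alt
  by_cases hneg : interval < 0
  · simp [hneg]
  · simp only [hneg, if_false]
    generalize hg : PySem.Int.mod interval 12 = r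
    have hr : r = 0 ∨ r = 1 ∨ r = 2 ∨ r = 3 ∨ r = 4 ∨ r = 5 ∨ r = 6 ∨
        r = 7 ∨ r = 8 ∨ r = 9 ∨ r = 10 ∨ r = 11 := by
      have h1 := PySem.Int.mod_nonneg interval (b := 12) (by omega)
      have h2 := PySem.Int.mod_lt interval (b := 12) (by omega)
      omega
    rcases hr with h|h|h|h|h|h|h|h|h|h|h|h <;> subst h <;>
      norm_num [C_MAJOR_SCALE, STEP, PySem.List.pyGetD, PySem.List.pyGet?, PySem.List.pyIdx?] <;> decide
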